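-- pv_equiv track=rewrite | github.com/lcinrain/6subpattern | pattern.py | replace_wildcard_simple
-- ===== SOURCE A (Python) =====
-- HEX_FULL = ['0','1','2','3','4','5','6','7','8','9','a','b','c','d','e','f']
--
-- def replace_wildcard_simple(pattern:str):
--     prefix = ''
--     prefixes = ['',]
--     prefixes_tmp = []
--     for h in pattern:
--         if h == '*':
--             for hex_char in HEX_FULL:
--                 for prefix in prefixes:
--                     prefix+=hex_char
--                     prefixes_tmp.append(prefix)
--             prefixes = prefixes_tmp
--             prefixes_tmp = []
--         else:
--             for prefix in prefixes:
--                 prefix+=h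
--                 prefixes_tmp.append(prefix)
--             prefixes = prefixes_tmp
--             prefixes_tmp = []
--     return prefixes
-- ===== SOURCE B (Python) =====
-- HEX_FULL = ['0','1','2','3','4','5','6','7','8','9','a','b','c','d','e','f']
--
-- def replace_wildcard_simple(pattern: str):
--     # Enumerate the 16**k combinations by index and build each output string
--     # once, instead of rebuilding whole prefix lists at every position.
--     k = pattern.count('*')
--     out = []
--     for i in range(16 ** k):
--         s = ''
--         x = i
--         for h in pattern:
--             if h == '*':
--                 s += HEX_FULL[x % 16]
--                 x //= 16
--             else:
--                 s += h
--         out.append(s)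
--     return out
-- ===== Notes on version B (the rewrite author's own statement) =====
-- stated objective: faster
-- what changed: B counts the wildcards once and enumerates the 16^k combinations by index, building each output string in a single left-to-right pass (digits of the index fill the stars), instead of A's rebuilding of the entire prefix list at every pattern position.
import Mathlib
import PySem

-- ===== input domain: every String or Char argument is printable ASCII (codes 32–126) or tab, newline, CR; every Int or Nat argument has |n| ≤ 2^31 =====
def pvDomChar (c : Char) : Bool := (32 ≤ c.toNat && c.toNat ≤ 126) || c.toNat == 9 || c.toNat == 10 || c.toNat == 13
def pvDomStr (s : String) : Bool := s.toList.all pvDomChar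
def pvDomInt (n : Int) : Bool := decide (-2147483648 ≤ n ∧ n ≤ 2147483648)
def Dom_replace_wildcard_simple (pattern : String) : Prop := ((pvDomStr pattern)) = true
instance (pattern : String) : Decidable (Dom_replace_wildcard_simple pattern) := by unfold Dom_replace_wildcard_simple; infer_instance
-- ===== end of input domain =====

-- B enumerates the 16^k wildcard combinations by index and builds each output
-- string once, instead of rebuilding the whole prefix list at every position
-- (objective: faster, same exact output list including order).

-- ===== PORT A =====
-- HEX_FULL from the Python module
def pvHex : List String := ["0","1","2","3","4","5","6","7","8","9","a","b","c","d","e","f"]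

-- one iteration of A's outer `for h in pattern` loop
def pvAStep (prefixes : List String) (h : Char) : List String :=
  if h = '*' then
    pvHex.foldl (fun tmp hex_char =>
      prefixes.foldl (fun t p => t ++ [p ++ hex_char]) tmp) []
  else
    prefixes.foldl (fun t p => t ++ [p ++ String.singleton h]) []

def replace_wildcard_simple (pattern : String) : List String :=
  pattern.toList.foldl pvAStep [""]

-- ===== PORT B =====
-- one iteration of B's inner `for h in pattern` loop; state = (s, x)
-- HEX_FULL[x % 16] is ported with pyGetD: 0 ≤ x % 16 < 16 always, so the index never raises
def pvBStep (st : String × Int) (h : Char) : String × Int :=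
  if h = '*' then
    (st.1 ++ PySem.List.pyGetD pvHex (PySem.Int.mod st.2 16) "", PySem.Int.floordiv st.2 16)
  else
    (st.1 ++ String.singleton h, st.2)

def replace_wildcard_simple_alt (pattern : String) : List String :=
  (PySem.List.pyRange 0 ((16 ^ PySem.Str.count pattern "*" : Nat) : Int) 1).map
    (fun i => (pattern.toList.foldl pvBStep ("", i)).1)

-- ===== PRECONDITION & SPEC =====
def Spec_replace_wildcard_simple (pattern : String) (out : List String) : Prop := out = replace_wildcard_simple_alt pattern
instance (pattern : String) (out : List String) : Decidable (Spec_replace_wildcard_simple pattern out) := by unfold Spec_replace_wildcard_simple; infer_instance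

-- ===== CLAIM (what is proved, stated in full; the proofs are below) =====
def Claim_equal_replace_wildcard_simple : Prop := ∀ (pattern : String), Dom_replace_wildcard_simple pattern → Spec_replace_wildcard_simple pattern (replace_wildcard_simple pattern)

-- ===== LEMMAS AND PROOFS =====

-- the string produced for combination index j (stars filled least-significant digit first)
def pvFill : List Char → Nat → String
  | [], _ => ""
  | h :: cs, j =>
    if h = '*' then pvHex.getD (j % 16) "" ++ pvFill cs (j / 16)
    else String.singleton h ++ pvFill cs j

-- PySem.Chars.count.go for a single-character needle counts occurrences of that character
theorem pv_count_go_singleton (c : Char) (l : List Char) :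
    ∀ (fuel acc : Nat), l.length ≤ fuel →
      PySem.Chars.count.go [c] fuel l acc = acc + l.count c := by
  induction l with
  | nil => intro fuel acc _; cases fuel <;> simp [PySem.Chars.count.go]
  | cons h t ih =>
    intro fuel acc hf
    cases fuel with
    | zero => simp at hf
    | succ f =>
      simp only [PySem.Chars.count.go, List.isPrefixOf, List.count_cons]
      by_cases hc : c = h
      · subst hc
        simp only [BEq.rfl, Bool.true_and, if_true, List.length_cons, List.length_nil,
          show (0 + 1 : Nat) = 1 from rfl, List.drop_one, List.tail_cons]
        rw [ih f (acc + 1) (by simpa using Nat.le_of_succ_le_succ hf)]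
        omega
      · have hbe : (c == h) = false := by simp [hc]
        simp only [hbe, Bool.false_and, Bool.false_eq_true, if_false]
        rw [ih f acc (by simpa using Nat.le_of_succ_le_succ hf)]
        simp [Ne.symm hc]

theorem pv_count_star (s : String) :
    PySem.Str.count s "*" = s.toList.count '*' := by
  rw [PySem.Str.count_eq, show ("*" : String).toList = ['*'] from by decide]
  unfold PySem.Chars.count
  simp only [List.isEmpty_cons, Bool.false_eq_true, if_false]
  rw [pv_count_go_singleton '*' s.toList s.toList.length 0 le_rfl]
  omega

-- B's inner loop computes pvFill
theorem pv_foldB (cs : List Char) :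
    ∀ (s : String) (j : Nat),
      (cs.foldl pvBStep (s, (j : Int))).1 = s ++ pvFill cs j := by
  induction cs with
  | nil => intro s j; simp [pvFill]
  | cons h t ih =>
    intro s j
    by_cases hs : h = '*'
    · subst hs
      have hmod : PySem.Int.mod (j : Int) 16 = ((j % 16 : Nat) : Int) := by
        simp [PySem.Int.mod, Int.fmod_eq_emod]
      have hdiv : PySem.Int.floordiv (j : Int) 16 = ((j / 16 : Nat) : Int) := by
        simp [PySem.Int.floordiv, Int.fdiv_eq_ediv]
      simp only [List.foldl_cons, pvBStep, hmod, hdiv, PySem.List.pyGetD_natCast, reduceIte]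
      rw [ih]
      simp [pvFill, String.append_assoc]
    · simp only [List.foldl_cons, pvBStep, if_neg hs]
      rw [ih, show pvFill (h :: t) j = String.singleton h ++ pvFill t j from by
            simp [pvFill, hs],
          ← String.append_assoc]

-- splitting range (n*16) into blocks of 16
theorem pv_range_mul16 (n : Nat) :
    List.range (n * 16) =
      (List.range n).flatMap (fun j => (List.range 16).map (fun r => 16 * j + r)) := by
  induction n with
  | zero => simp
  | succ n ih =>
    rw [show (n + 1) * 16 = n * 16 + 16 from by ring, List.range_add, ih,
        show List.range (n + 1) = List.range n ++ [n] from List.range_succ,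
        List.flatMap_append]
    simp [Nat.mul_comm]

-- the 16 hex digits, enumerated by index
theorem pv_hex_enum {α : Type} (g : String → List α) :
    pvHex.flatMap g = (List.range 16).flatMap (fun r => g (pvHex.getD r "")) := by
  simp [pvHex, List.range_succ]

theorem pv_flatMap_singleton {α β : Type} (f : α → β) (l : List α) :
    l.flatMap (fun j => [f j]) = l.map f := by
  induction l with
  | nil => rfl
  | cons x xs ih => simp only [List.flatMap_cons, List.map_cons, ih]; rfl

-- A's fold, with a generalized prefix list, in closed form
theorem pv_foldA (cs : List Char) :
    ∀ (ps : List String),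
      cs.foldl pvAStep ps =
        (List.range (16 ^ cs.count '*')).flatMap
          (fun j => ps.map (fun p => p ++ pvFill cs j)) := by
  induction cs with
  | nil => intro ps; simp [pvFill]
  | cons h t ih =>
    intro ps
    by_cases hs : h = '*'
    · subst hs
      have hstep : pvAStep ps '*' = pvHex.flatMap (fun c => ps.map (fun p => p ++ c)) := by
        simp only [pvAStep, reduceIte]
        rw [PySem.List.foldl_congr_mem pvHex _
              (fun tmp c => tmp ++ ps.map (fun p => p ++ c)) []
              (fun tmp c _ => PySem.List.foldl_append_singleton_eq_map _ ps tmp)]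
        simpa using PySem.List.foldl_append_eq_flatMap (fun c => ps.map (fun p => p ++ c)) pvHex []
      rw [List.foldl_cons, hstep, ih,
          show (('*' :: t).count '*') = t.count '*' + 1 from by simp,
          pow_succ, pv_range_mul16, List.flatMap_assoc]
      apply List.flatMap_congr
      intro j _
      rw [List.map_flatMap, List.flatMap_map, pv_hex_enum]
      apply List.flatMap_congr
      intro r hr
      have hr16 : r < 16 := by simpa using hr
      rw [List.map_map]
      apply List.map_congr_left
      intro p _
      have hfill : pvFill ('*' :: t) (16 * j + r) = pvHex.getD r "" ++ pvFill t j := by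
        simp only [pvFill, reduceIte]
        congr 2
        · omega
        · omega
      simp [Function.comp, hfill, String.append_assoc]
    · simp only [List.foldl_cons, pvAStep, if_neg hs]
      rw [PySem.List.foldl_append_singleton_eq_map, List.nil_append, ih,
          show ((h :: t).count '*') = t.count '*' from by simp [hs]]
      apply List.flatMap_congr
      intro j _
      rw [List.map_map]
      apply List.map_congr_left
      intro p _
      simp only [Function.comp]
      rw [show pvFill (h :: t) j = String.singleton h ++ pvFill t j from by simp [pvFill, hs],
          ← String.append_assoc]

-- ===== VERDICT (by name: the statement is the Claim_ definition above) =====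
theorem replace_wildcard_simple_spec : Claim_equal_replace_wildcard_simple := by
  intro pattern _
  unfold Spec_replace_wildcard_simple replace_wildcard_simple replace_wildcard_simple_alt
  rw [pv_foldA, pv_count_star, PySem.List.pyRange_zero_nat, List.map_map]
  have hB : ∀ j : Nat,
      ((fun i => (pattern.toList.foldl pvBStep ("", i)).1) ∘ fun k : Nat => (k : Int)) j
        = pvFill pattern.toList j := by
    intro j
    simp only [Function.comp]
    rw [pv_foldB]
    simp
  rw [List.map_congr_left (fun j _ => hB j)]
  exact pv_flatMap_singleton _ _
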